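-- pv_equiv track=rewrite | github.com/0patsick0/Autosolver | agent/autosolver_agent/research.py | _guided_value_choice
-- ===== SOURCE A (Python) =====
-- def _neighbor_value(current: object, allowed: list[object], offset: int) -> object:
--     if not allowed:
--         return current
--     if current not in allowed:
--         return allowed[offset % len(allowed)]
--     if len(allowed) == 1:
--         return allowed[0]
--
--     current_index = allowed.index(current)
--     candidate_indexes: list[int] = []
--     for step in range(1, len(allowed)):
--         left_index = current_index - step
--         right_index = current_index + step
--         if left_index >= 0:
--             candidate_indexes.append(left_index)
--         if right_index < len(allowed):
--             candidate_indexes.append(right_index)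
--
--     if not candidate_indexes:
--         return current
--     return allowed[candidate_indexes[offset % len(candidate_indexes)]]
--
-- def _guided_value_choice(
--     current: object,
--     allowed: list[object],
--     preferred_values: list[object],
--     offset: int,
--     blocked_values: list[object] | None = None,
-- ) -> object:
--     if not allowed:
--         return current
--
--     blocked_set = set(blocked_values or [])
--     candidate_pool = [value for value in allowed if value not in blocked_set]
--     if not candidate_pool:
--         candidate_pool = list(allowed)
--
--     ranked_candidates: list[object] = []
--     for value in preferred_values:
--         if value in candidate_pool and value != current and value not in ranked_candidates:
--             ranked_candidates.append(value)
--
--     if current in candidate_pool: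
--         ranked_candidates.extend(
--             value for value in [_neighbor_value(current, candidate_pool, offset + step) for step in range(len(candidate_pool))]
--             if value != current and value not in ranked_candidates
--         )
--
--     ranked_candidates.extend(value for value in candidate_pool if value != current and value not in ranked_candidates)
--     if not ranked_candidates:
--         return current if current in candidate_pool else candidate_pool[offset % len(candidate_pool)]
--     return ranked_candidates[offset % len(ranked_candidates)]
-- ===== SOURCE B (Python) =====
-- def _guided_value_choice(
--     current,
--     allowed,
--     preferred_values,
--     offset,
--     blocked_values=None,
-- ):
--     if not allowed:
--         return current
--
--     blocked = set(blocked_values or [])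
--     pool = [v for v in allowed if v not in blocked] or list(allowed)
--     n = len(pool)
--
--     ranked = []
--     seen = set()
--     for v in preferred_values:
--         if v in pool and v != current and v not in seen:
--             ranked.append(v)
--             seen.add(v)
--
--     if current in pool:
--         # neighbour ordering built once: indexes sorted by (distance, left-first),
--         # rotated left by offset mod (n - 1)
--         ci = pool.index(current)
--         order = sorted((i for i in range(n) if i != ci),
--                        key=lambda i: 2 * abs(i - ci) + (1 if i > ci else 0))
--         if order:
--             r = offset % len(order)
--             order = order[r:] + order[:r]
--         for i in order:
--             v = pool[i]
--             if v != current and v not in seen: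
--                 ranked.append(v)
--                 seen.add(v)
--     else:
--         for v in pool:
--             if v not in seen:
--                 ranked.append(v)
--                 seen.add(v)
--
--     if not ranked:
--         return current
--     return ranked[offset % len(ranked)]
-- ===== Notes on version B (the rewrite author's own statement) =====
-- stated objective: alternative
-- what changed: B replaces A's per-step re-invocation of _neighbor_value (which re-runs pool.index and rebuilds the interleaved candidate-index list on every one of the n steps) by building the neighbour ordering once - sorting the non-current indexes by 2*|i-ci|+(i>ci) and rotating left by offset mod (n-1) - drops A's always-no-op trailing pool pass when current is in the pool, and keeps a seen-set instead of rescanning the ranked list for dedup.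
import Mathlib
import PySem

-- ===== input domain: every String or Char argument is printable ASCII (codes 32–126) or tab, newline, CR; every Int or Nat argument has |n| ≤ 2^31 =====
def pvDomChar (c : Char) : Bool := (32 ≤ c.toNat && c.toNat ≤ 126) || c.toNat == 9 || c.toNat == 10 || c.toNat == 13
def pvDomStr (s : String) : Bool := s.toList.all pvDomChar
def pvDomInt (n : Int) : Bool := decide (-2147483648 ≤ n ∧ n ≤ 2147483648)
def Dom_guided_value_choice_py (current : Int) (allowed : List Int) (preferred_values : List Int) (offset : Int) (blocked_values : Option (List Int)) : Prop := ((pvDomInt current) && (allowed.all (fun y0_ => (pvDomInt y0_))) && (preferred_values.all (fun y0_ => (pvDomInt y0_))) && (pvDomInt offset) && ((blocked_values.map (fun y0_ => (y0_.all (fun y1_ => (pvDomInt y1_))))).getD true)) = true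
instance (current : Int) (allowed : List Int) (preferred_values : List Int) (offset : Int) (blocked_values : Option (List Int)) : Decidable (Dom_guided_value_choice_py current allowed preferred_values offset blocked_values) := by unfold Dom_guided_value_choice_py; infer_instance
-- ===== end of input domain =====

-- B builds the neighbour ordering once (sort non-current indexes by distance, left first, then
-- rotate by offset mod (n-1)) instead of A's per-step _neighbor_value re-scans, and keeps a seen-set
-- for dedup; proved to return exactly A's value on every input.


-- ===== PORT A =====
-- helper: literal port of _neighbor_value
def neighbor_value_py (current : Int) (allowed : List Int) (offset : Int) : Int :=
  if allowed = [] then current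
  else if current ∉ allowed then
    PySem.List.pyGetD allowed (PySem.Int.mod offset (allowed.length : Int)) 0
  else if allowed.length = 1 then
    PySem.List.pyGetD allowed 0 0
  else
    let current_index : Int := (((PySem.List.index? allowed current).getD 0 : Nat) : Int)
    let candidate_indexes : List Int :=
      (PySem.List.pyRange 1 (allowed.length : Int) 1).foldl (fun acc step =>
        let left_index := current_index - step
        let right_index := current_index + step
        let acc := if 0 ≤ left_index then acc ++ [left_index] else acc
        if right_index < (allowed.length : Int) then acc ++ [right_index] else acc) []
    if candidate_indexes = [] then current
    else
      PySem.List.pyGetD allowed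
        (PySem.List.pyGetD candidate_indexes
          (PySem.Int.mod offset (candidate_indexes.length : Int)) 0) 0

def guided_value_choice_py (current : Int) (allowed : List Int) (preferred_values : List Int) (offset : Int) (blocked_values : Option (List Int)) : Int :=
  if allowed = [] then current
  else
    let blocked_set : PySem.Set Int := PySem.Set.ofList (blocked_values.getD [])
    let pool0 := allowed.filter (fun v => !PySem.Set.contains blocked_set v)
    let candidate_pool := if pool0 = [] then allowed else pool0
    let ranked1 := preferred_values.foldl (fun acc v =>
      if v ∈ candidate_pool ∧ v ≠ current ∧ v ∉ acc then acc ++ [v] else acc) ([] : List Int)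
    let ranked2 := if current ∈ candidate_pool then
        ((PySem.List.pyRange 0 (candidate_pool.length : Int) 1).map
            (fun step => neighbor_value_py current candidate_pool (offset + step))).foldl
          (fun acc v => if v ≠ current ∧ v ∉ acc then acc ++ [v] else acc) ranked1
      else ranked1
    let ranked3 := candidate_pool.foldl
      (fun acc v => if v ≠ current ∧ v ∉ acc then acc ++ [v] else acc) ranked2
    if ranked3 = [] then
      if current ∈ candidate_pool then current
      else PySem.List.pyGetD candidate_pool (PySem.Int.mod offset (candidate_pool.length : Int)) 0
    else PySem.List.pyGetD ranked3 (PySem.Int.mod offset (ranked3.length : Int)) 0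

-- ===== PORT B =====
def guided_value_choice_py_alt (current : Int) (allowed : List Int) (preferred_values : List Int) (offset : Int) (blocked_values : Option (List Int)) : Int :=
  if allowed = [] then current
  else
    let blocked_set : PySem.Set Int := PySem.Set.ofList (blocked_values.getD [])
    let pool0 := allowed.filter (fun v => !PySem.Set.contains blocked_set v)
    let pool := if pool0 = [] then allowed else pool0
    let n := pool.length
    let st1 := preferred_values.foldl (fun (st : List Int × PySem.Set Int) v =>
        if v ∈ pool ∧ v ≠ current ∧ PySem.Set.contains st.2 v = false
        then (st.1 ++ [v], PySem.Set.add st.2 v) else st)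
      (([] : List Int), (PySem.Set.empty : PySem.Set Int))
    let st2 :=
      if current ∈ pool then
        -- neighbour ordering built once: indexes ≠ ci sorted by 2*|i-ci| + (1 if i>ci else 0),
        -- then rotated left by offset mod (n-1)
        let ci := (PySem.List.index? pool current).getD 0
        let order := PySem.List.sorted ((List.range n).filter (fun i => i ≠ ci))
          (fun i => 2 * ((i : Int) - (ci : Int)).natAbs + (if ci < i then 1 else 0) : Nat → Nat) false
        let order := if order = [] then order
          else
            let r := (PySem.Int.mod offset (order.length : Int)).toNat
            order.drop r ++ order.take r
        order.foldl (fun (st : List Int × PySem.Set Int) (i : Nat) =>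
          let v := PySem.List.pyGetD pool (i : Int) 0
          if v ≠ current ∧ PySem.Set.contains st.2 v = false
          then (st.1 ++ [v], PySem.Set.add st.2 v) else st) st1
      else
        pool.foldl (fun (st : List Int × PySem.Set Int) v =>
          if PySem.Set.contains st.2 v = false
          then (st.1 ++ [v], PySem.Set.add st.2 v) else st) st1
    let ranked := st2.1
    if ranked = [] then current
    else PySem.List.pyGetD ranked (PySem.Int.mod offset (ranked.length : Int)) 0

-- ===== PRECONDITION & SPEC =====
def Spec_guided_value_choice_py (current : Int) (allowed : List Int) (preferred_values : List Int) (offset : Int) (blocked_values : Option (List Int)) (out : Int) : Prop := out = guided_value_choice_py_alt current allowed preferred_values offset blocked_values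
instance (current : Int) (allowed : List Int) (preferred_values : List Int) (offset : Int) (blocked_values : Option (List Int)) (out : Int) : Decidable (Spec_guided_value_choice_py current allowed preferred_values offset blocked_values out) := by unfold Spec_guided_value_choice_py; infer_instance

-- ===== CLAIM (what is proved, stated in full; the proofs are below) =====
def Claim_equal_guided_value_choice_py : Prop := ∀ (current : Int) (allowed : List Int) (preferred_values : List Int) (offset : Int) (blocked_values : Option (List Int)), Dom_guided_value_choice_py current allowed preferred_values offset blocked_values → Spec_guided_value_choice_py current allowed preferred_values offset blocked_values (guided_value_choice_py current allowed preferred_values offset blocked_values)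

-- ===== LEMMAS AND PROOFS =====

-- B maintains (ranked, seen) with a PySem.Set; A tests membership in the ranked list itself.
-- The three pairfold lemmas say the two bookkeeping styles agree, one per loop shape of Source B.
theorem pairfold1 (c : Int) (p l : List Int) :
    ∀ (acc : List Int) (s : PySem.Set Int), (∀ v : Int, PySem.Set.contains s v = true ↔ v ∈ acc) →
    (List.foldl (fun (st : List Int × PySem.Set Int) v =>
        if v ∈ p ∧ v ≠ c ∧ PySem.Set.contains st.2 v = false then (st.1 ++ [v], PySem.Set.add st.2 v) else st) (acc, s) l).1
      = List.foldl (fun acc v => if v ∈ p ∧ v ≠ c ∧ v ∉ acc then acc ++ [v] else acc) acc l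
    ∧ ∀ v : Int, PySem.Set.contains (List.foldl (fun (st : List Int × PySem.Set Int) v =>
        if v ∈ p ∧ v ≠ c ∧ PySem.Set.contains st.2 v = false then (st.1 ++ [v], PySem.Set.add st.2 v) else st) (acc, s) l).2 v = true
        ↔ v ∈ List.foldl (fun acc v => if v ∈ p ∧ v ≠ c ∧ v ∉ acc then acc ++ [v] else acc) acc l := by
  induction l with
  | nil => intro acc s hs; exact ⟨rfl, hs⟩
  | cons w l ih =>
    intro acc s hs
    have hs' : ∀ v : Int, v ∈ s ↔ v ∈ acc := by
      intro v; rw [← hs v]; simp [PySem.Set.contains]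
    simp only [List.foldl_cons]
    by_cases hw : w ∈ acc
    · rw [if_neg (by simp [PySem.Set.contains, (hs' w).mpr hw]), if_neg (by simp [hw])]
      exact ih acc s hs
    · have hwns : w ∉ s := fun h => hw ((hs' w).mp h)
      have hcw : PySem.Set.contains s w = false := by simp [PySem.Set.contains, hwns]
      by_cases hP : w ∈ p ∧ w ≠ c
      · rw [if_pos ⟨hP.1, hP.2, hcw⟩, if_pos ⟨hP.1, hP.2, hw⟩]
        refine ih (acc ++ [w]) (PySem.Set.add s w) ?_
        intro v
        simp [PySem.Set.add, PySem.Set.contains, hwns, hs' v]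
      · rw [if_neg (fun h => hP ⟨h.1, h.2.1⟩), if_neg (fun h => hP ⟨h.1, h.2.1⟩)]
        exact ih acc s hs

theorem pairfold2 (c : Int) (l : List Int) :
    ∀ (st0 : List Int × PySem.Set Int), (∀ v : Int, PySem.Set.contains st0.2 v = true ↔ v ∈ st0.1) →
    (List.foldl (fun (st : List Int × PySem.Set Int) v =>
        if v ≠ c ∧ PySem.Set.contains st.2 v = false then (st.1 ++ [v], PySem.Set.add st.2 v) else st) st0 l).1
      = List.foldl (fun acc v => if v ≠ c ∧ v ∉ acc then acc ++ [v] else acc) st0.1 l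
    ∧ ∀ v : Int, PySem.Set.contains (List.foldl (fun (st : List Int × PySem.Set Int) v =>
        if v ≠ c ∧ PySem.Set.contains st.2 v = false then (st.1 ++ [v], PySem.Set.add st.2 v) else st) st0 l).2 v = true
        ↔ v ∈ List.foldl (fun acc v => if v ≠ c ∧ v ∉ acc then acc ++ [v] else acc) st0.1 l := by
  induction l with
  | nil => intro st0 hs; exact ⟨rfl, hs⟩
  | cons w l ih =>
    intro st0 hs
    have hs' : ∀ v : Int, v ∈ st0.2 ↔ v ∈ st0.1 := by
      intro v; rw [← hs v]; simp [PySem.Set.contains]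
    simp only [List.foldl_cons]
    by_cases hw : w ∈ st0.1
    · rw [if_neg (by simp [PySem.Set.contains, (hs' w).mpr hw]), if_neg (by simp [hw])]
      exact ih st0 hs
    · have hwns : w ∉ st0.2 := fun h => hw ((hs' w).mp h)
      have hcw : PySem.Set.contains st0.2 w = false := by simp [PySem.Set.contains, hwns]
      by_cases hP : w ≠ c
      · rw [if_pos ⟨hP, hcw⟩, if_pos ⟨hP, hw⟩]
        refine ih (st0.1 ++ [w], PySem.Set.add st0.2 w) ?_
        intro v
        simp [PySem.Set.add, PySem.Set.contains, hwns, hs' v]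
      · rw [if_neg (fun h => hP h.1), if_neg (fun h => hP h.1)]
        exact ih st0 hs

theorem pairfold3 (l : List Int) :
    ∀ (st0 : List Int × PySem.Set Int), (∀ v : Int, PySem.Set.contains st0.2 v = true ↔ v ∈ st0.1) →
    (List.foldl (fun (st : List Int × PySem.Set Int) v =>
        if PySem.Set.contains st.2 v = false then (st.1 ++ [v], PySem.Set.add st.2 v) else st) st0 l).1
      = List.foldl (fun acc v => if v ∉ acc then acc ++ [v] else acc) st0.1 l := by
  induction l with
  | nil => intro st0 hs; rfl
  | cons w l ih =>
    intro st0 hs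
    have hs' : ∀ v : Int, v ∈ st0.2 ↔ v ∈ st0.1 := by
      intro v; rw [← hs v]; simp [PySem.Set.contains]
    simp only [List.foldl_cons]
    by_cases hw : w ∈ st0.1
    · rw [if_neg (by simp [PySem.Set.contains, (hs' w).mpr hw]), if_neg (by simp [hw])]
      exact ih st0 hs
    · have hwns : w ∉ st0.2 := fun h => hw ((hs' w).mp h)
      rw [if_pos (by simp [PySem.Set.contains, hwns]), if_pos hw]
      refine ih (st0.1 ++ [w], PySem.Set.add st0.2 w) ?_
      intro v
      simp [PySem.Set.add, PySem.Set.contains, hwns, hs' v]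

theorem dfold_mem_of_mem (c : Int) (l : List Int) :
    ∀ (acc : List Int) (v : Int), v ∈ acc →
      v ∈ List.foldl (fun acc v => if v ≠ c ∧ v ∉ acc then acc ++ [v] else acc) acc l := by
  induction l with
  | nil => intro acc v hv; simpa using hv
  | cons w l ih =>
    intro acc v hv
    simp only [List.foldl_cons]
    split
    · exact ih _ v (by simp [hv])
    · exact ih _ v hv

theorem dfold_mem (c : Int) (l : List Int) :
    ∀ (acc : List Int) (v : Int), v ∈ l → v ≠ c →
      v ∈ List.foldl (fun acc v => if v ≠ c ∧ v ∉ acc then acc ++ [v] else acc) acc l := by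
  induction l with
  | nil => intro acc v hv; simp at hv
  | cons w l ih =>
    intro acc v hv hne
    rcases List.mem_cons.mp hv with rfl | hv
    · simp only [List.foldl_cons]
      by_cases hw : v ∈ acc
      · split
        · exact dfold_mem_of_mem c l _ v (by simp [hw])
        · exact dfold_mem_of_mem c l _ v hw
      · rw [if_pos ⟨hne, hw⟩]
        exact dfold_mem_of_mem c l _ v (by simp)
    · simp only [List.foldl_cons]
      split
      · exact ih _ v hv hne
      · exact ih _ v hv hne

theorem dfold_noop (c : Int) (l : List Int) :
    ∀ (acc : List Int), (∀ v ∈ l, v = c ∨ v ∈ acc) →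
      List.foldl (fun acc v => if v ≠ c ∧ v ∉ acc then acc ++ [v] else acc) acc l = acc := by
  induction l with
  | nil => intro acc _; rfl
  | cons w l ih =>
    intro acc h
    simp only [List.foldl_cons]
    rw [if_neg (by rcases h w (by simp) with h1 | h1 <;> simp [h1])]
    exact ih acc (fun v hv => h v (by simp [hv]))

theorem dfold_concat (c : Int) (l : List Int) (x : Int) (hx : x ∈ l) (acc : List Int) :
    List.foldl (fun acc v => if v ≠ c ∧ v ∉ acc then acc ++ [v] else acc) acc (l ++ [x])
      = List.foldl (fun acc v => if v ≠ c ∧ v ∉ acc then acc ++ [v] else acc) acc l := by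
  rw [List.foldl_append]
  simp only [List.foldl_cons, List.foldl_nil]
  by_cases hxc : x = c
  · rw [if_neg (by simp [hxc])]
  · rw [if_neg (by simp [dfold_mem c l acc x hx hxc])]

-- the neighbour ordering: indexes ≠ ci grouped by distance, left before right
def nbrBlocks (ci n : Nat) (step : Nat) : List Nat :=
  (if step ≤ ci then [ci - step] else []) ++ (if ci + step < n then [ci + step] else [])

def nbrList (ci n : Nat) : List Nat := (List.range' 1 (n - 1)).flatMap (nbrBlocks ci n)

def nbrKey (ci : Nat) (i : Nat) : Nat := 2 * ((i : Int) - (ci : Int)).natAbs + (if ci < i then 1 else 0)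

theorem nbr_mem (ci n : Nat) (hci : ci < n) (j : Nat) :
    j ∈ nbrList ci n ↔ j < n ∧ j ≠ ci := by
  unfold nbrList nbrBlocks
  simp only [List.mem_flatMap, List.mem_range'_1, List.mem_append]
  constructor
  · rintro ⟨step, ⟨h1, h2⟩, hj | hj⟩
    · split at hj <;> simp at hj
      omega
    · split at hj <;> simp at hj
      omega
  · rintro ⟨hjn, hne⟩
    by_cases hlt : j < ci
    · exact ⟨ci - j, by omega, Or.inl (by rw [if_pos (by omega)]; simp; omega)⟩
    · exact ⟨j - ci, by omega, Or.inr (by rw [if_pos (by omega)]; simp; omega)⟩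

theorem nbr_key_left (ci step : Nat) (h2 : step ≤ ci) : nbrKey ci (ci - step) = 2 * step := by
  unfold nbrKey
  rw [if_neg (by omega)]
  have h : ((ci - step : Nat) : Int) - (ci : Int) = -(step : Int) := by omega
  rw [h, Int.natAbs_neg, Int.natAbs_natCast]
  omega

theorem nbr_key_right (ci step : Nat) : nbrKey ci (ci + step) = 2 * step + (if 1 ≤ step then 1 else 0) := by
  unfold nbrKey
  have h : ((ci + step : Nat) : Int) - (ci : Int) = (step : Int) := by omega
  rw [h, Int.natAbs_natCast]
  split <;> split <;> omega

theorem nbr_key_bound (ci n m : Nat) :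
    ∀ j ∈ (List.range' 1 m).flatMap (nbrBlocks ci n), nbrKey ci j < 2 * m + 2 := by
  intro j hj
  simp only [List.mem_flatMap, List.mem_range'_1] at hj
  obtain ⟨step, ⟨h1, h2⟩, hj⟩ := hj
  unfold nbrBlocks at hj
  rcases List.mem_append.mp hj with hj | hj
  · split at hj <;> simp at hj
    subst hj
    rw [nbr_key_left ci step (by omega)]; omega
  · split at hj <;> simp at hj
    subst hj
    rw [nbr_key_right ci step]; split <;> omega

theorem nbr_block_pairwise (ci n step : Nat) (h1 : 1 ≤ step) :
    (nbrBlocks ci n step).Pairwise (fun a b => nbrKey ci a < nbrKey ci b) := by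
  unfold nbrBlocks
  split <;> split <;> simp
  rename_i hle hlt
  rw [nbr_key_left ci step hle, nbr_key_right ci step, if_pos h1]
  omega

theorem nbr_key_lower (ci n step : Nat) :
    ∀ b ∈ nbrBlocks ci n step, 2 * step ≤ nbrKey ci b := by
  intro b hb
  unfold nbrBlocks at hb
  rcases List.mem_append.mp hb with hb | hb
  · split at hb <;> simp at hb
    subst hb; rw [nbr_key_left ci step (by assumption)]
  · split at hb <;> simp at hb
    subst hb; rw [nbr_key_right ci step]; omega

theorem nbr_pairwise_aux (ci n : Nat) :
    ∀ m, ((List.range' 1 m).flatMap (nbrBlocks ci n)).Pairwise (fun a b => nbrKey ci a < nbrKey ci b) := by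
  intro m
  induction m with
  | zero => simp
  | succ m ih =>
    rw [List.range'_concat, List.flatMap_append]
    refine List.pairwise_append.mpr ⟨ih, ?_, ?_⟩
    · simpa using nbr_block_pairwise ci n (1 + m) (by omega)
    · intro a ha b hb
      have hb' : 2 * (1 + m) ≤ nbrKey ci b := by
        refine nbr_key_lower ci n (1 + m) b ?_
        simpa using hb
      have ha' := nbr_key_bound ci n m a ha
      omega

theorem nbr_pairwise (ci n : Nat) :
    (nbrList ci n).Pairwise (fun a b => nbrKey ci a < nbrKey ci b) :=
  nbr_pairwise_aux ci n (n - 1)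

theorem nbr_nodup (ci n : Nat) : (nbrList ci n).Nodup :=
  (nbr_pairwise ci n).imp (fun h => by rintro rfl; exact lt_irrefl _ h)

theorem nbr_perm (ci n : Nat) (hci : ci < n) :
    (nbrList ci n).Perm ((List.range n).filter (fun i => i ≠ ci)) := by
  rw [List.perm_ext_iff_of_nodup (nbr_nodup ci n) ((List.nodup_range).filter _)]
  intro a
  simp [nbr_mem ci n hci, List.mem_filter, List.mem_range]

theorem filter_range_len (ci n : Nat) (hci : ci < n) :
    ((List.range n).filter (fun i => i ≠ ci)).length = n - 1 := by
  induction n with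
  | zero => omega
  | succ n ih =>
    rw [List.range_succ, List.filter_append]
    by_cases h : ci = n
    · subst h
      rw [List.filter_eq_self.mpr (by intro a ha; simp [List.mem_range] at ha ⊢; omega)]
      simp
    · rw [List.length_append, ih (by omega)]
      have : List.filter (fun i => i ≠ ci) [n] = [n] := by simp; omega
      rw [this]
      simp
      omega

theorem nbr_length (ci n : Nat) (hci : ci < n) : (nbrList ci n).length = n - 1 := by
  rw [(nbr_perm ci n hci).length_eq, filter_range_len ci n hci]

theorem nbr_sorted (ci n : Nat) (hci : ci < n) :
    PySem.List.sorted ((List.range n).filter (fun i => i ≠ ci))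
      (fun i => 2 * ((i : Int) - (ci : Int)).natAbs + (if ci < i then 1 else 0)) = nbrList ci n := by
  refine PySem.List.sorted_eq_of_perm_of_pairwise_lt _ _ _ (nbr_perm ci n hci) ?_
  exact nbr_pairwise ci n

-- A's hand-interleaved candidate_indexes loop produces exactly nbrList (as Int indexes)
theorem cand_eq (ci n : Nat) (hci : ci < n) :
    List.foldl (fun acc step =>
        if (ci : Int) + step < (n : Int) then
          (if 0 ≤ (ci : Int) - step then acc ++ [(ci : Int) - step] else acc) ++ [(ci : Int) + step]
        else (if 0 ≤ (ci : Int) - step then acc ++ [(ci : Int) - step] else acc)) []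
      (PySem.List.pyRange 1 (n : Int) 1)
      = (nbrList ci n).map (fun i : Nat => (i : Int)) := by
  have hbody : (fun (acc : List Int) (step : Int) =>
      if (ci : Int) + step < (n : Int) then
        (if 0 ≤ (ci : Int) - step then acc ++ [(ci : Int) - step] else acc) ++ [(ci : Int) + step]
      else (if 0 ≤ (ci : Int) - step then acc ++ [(ci : Int) - step] else acc))
      = (fun acc step => acc ++ ((if 0 ≤ (ci : Int) - step then [(ci : Int) - step] else []) ++
          (if (ci : Int) + step < (n : Int) then [(ci : Int) + step] else []))) := by
    funext acc step
    split_ifs <;> simp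
  rw [hbody, PySem.List.foldl_append_eq_flatMap, List.nil_append]
  have hn1 : ((n : Int) - 1).toNat = n - 1 := by omega
  rw [PySem.List.pyRange_one, hn1]
  unfold nbrList
  rw [List.range'_eq_map_range]
  simp only [List.flatMap_map, List.map_flatMap]
  refine List.flatMap_congr ?_
  intro k hk
  unfold nbrBlocks
  simp only [List.map_append]
  split_ifs <;> simp <;> omega

-- neighbour_value on the interesting branch: p[nbr[(t mod m)]]
theorem nv_eq (c : Int) (p : List Int) (t : Int) (ciN : Nat)
    (hp : p ≠ []) (hc : c ∈ p) (hn : p.length ≠ 1) (hci : PySem.List.index? p c = some ciN) :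
    neighbor_value_py c p t =
      PySem.List.pyGetD p
        (PySem.List.pyGetD ((nbrList ciN p.length).map (fun i : Nat => (i : Int)))
          (PySem.Int.mod t (((nbrList ciN p.length).map (fun i : Nat => (i : Int))).length : Int)) 0) 0 := by
  obtain ⟨hciLt, hgetci, -⟩ := PySem.List.getElem_of_index?_eq_some hci
  have hn2 : 2 ≤ p.length := by
    have h0 : p.length ≠ 0 := fun h => hp (List.length_eq_zero_iff.mp h)
    omega
  unfold neighbor_value_py
  rw [if_neg hp, if_neg (not_not_intro hc), if_neg hn]
  simp only [hci, Option.getD_some]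
  rw [cand_eq ciN p.length hciLt]
  rw [if_neg ?hne]
  case hne =>
    intro h
    have hlen := congrArg List.length h
    rw [List.length_map, nbr_length ciN p.length hciLt] at hlen
    simp at hlen
    omega

-- A's per-step neighbour list = B's rotated ordering (as values) plus a repeat of its first element
theorem L_eq (c off : Int) (p : List Int) (ciN : Nat)
    (hp : p ≠ []) (hc : c ∈ p) (hn : p.length ≠ 1) (hci : PySem.List.index? p c = some ciN) :
    (PySem.List.pyRange 0 (p.length : Int) 1).map (fun s => neighbor_value_py c p (off + s))
      = (((nbrList ciN p.length).drop ((PySem.Int.mod off ((nbrList ciN p.length).length : Int)).toNat)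
          ++ (nbrList ciN p.length).take ((PySem.Int.mod off ((nbrList ciN p.length).length : Int)).toNat)).map
            (fun i : Nat => PySem.List.pyGetD p (i : Int) 0)) ++
        [PySem.List.pyGetD p ((nbrList ciN p.length).getD ((PySem.Int.mod off ((nbrList ciN p.length).length : Int)).toNat) 0 : Nat) 0] := by
  obtain ⟨hciLt, hgetci, -⟩ := PySem.List.getElem_of_index?_eq_some hci
  have hn2 : 2 ≤ p.length := by
    have h0 : p.length ≠ 0 := fun h => hp (List.length_eq_zero_iff.mp h)
    omega
  have hm : (nbrList ciN p.length).length = p.length - 1 := nbr_length ciN p.length hciLt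
  set nbr := nbrList ciN p.length with hnbr
  set m := nbr.length with hmdef
  have hm1 : 1 ≤ m := by omega
  set R := PySem.Int.mod off (m : Int) with hRdef
  have hR0 : 0 ≤ R := by
    rw [hRdef, PySem.Int.mod_eq_emod_of_pos (by omega)]
    exact Int.emod_nonneg off (by omega)
  have hRm : R < (m : Int) := by
    rw [hRdef, PySem.Int.mod_eq_emod_of_pos (by omega)]
    exact Int.emod_lt_of_pos off (by omega)
  set r := R.toNat with hrdef
  have hrm : r < m := by omega
  apply List.ext_getElem
  · simp only [List.length_map, PySem.List.length_pyRange_one, List.length_append,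
      List.length_drop, List.length_take, List.length_cons, List.length_nil]
    omega
  · intro k h1 h2
    have hk : k < p.length := by
      simp only [List.length_map, PySem.List.length_pyRange_one] at h1
      omega
    simp only [List.getElem_map, PySem.List.getElem_pyRange_one, zero_add]
    rw [nv_eq c p (off + (k : Int)) ciN hp hc hn hci, ← hnbr, List.length_map, ← hmdef]
    have hoff : off = (m : Int) * (off / (m : Int)) + R := by
      rw [hRdef, PySem.Int.mod_eq_emod_of_pos (by omega)]
      exact (Int.mul_ediv_add_emod off (m : Int)).symm
    have hmod : PySem.Int.mod (off + (k : Int)) (m : Int)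
        = if R + (k : Int) < (m : Int) then R + (k : Int) else R + (k : Int) - (m : Int) := by
      rw [PySem.Int.mod_eq_emod_of_pos (by omega)]
      have h3 : off + (k : Int) = R + (k : Int) + (m : Int) * (off / (m : Int)) := by omega
      rw [h3, Int.add_mul_emod_self_left]
      by_cases hcase : R + (k : Int) < (m : Int)
      · rw [if_pos hcase, Int.emod_eq_of_lt (by omega) hcase]
      · rw [if_neg hcase, ← Int.sub_emod_right (R + (k : Int)) (m : Int)]
        exact Int.emod_eq_of_lt (by omega) (by omega)
    rw [hmod]
    have hXlen : ((nbr.drop r ++ nbr.take r).map (fun i : Nat => PySem.List.pyGetD p (i : Int) 0)).length = m := by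
      simp only [List.length_map, List.length_append, List.length_drop, List.length_take]
      omega
    by_cases hcase : R + (k : Int) < (m : Int)
    · rw [if_pos hcase]
      have hb0 : (0 : Int) ≤ R + (k : Int) := by omega
      have hb1 : R + (k : Int) < ((nbr.map (fun i : Nat => (i : Int))).length : Int) := by
        rw [List.length_map, ← hmdef]; omega
      rw [PySem.List.pyGetD_eq_getElem (nbr.map (fun i : Nat => (i : Int))) 0 hb0 hb1, List.getElem_map]
      rw [List.getElem_append_left (by rw [hXlen]; omega)]
      rw [List.getElem_map]
      rw [List.getElem_append_left (by rw [List.length_drop]; omega)]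
      rw [List.getElem_drop]
      have htn : (R + (k : Int)).toNat = r + k := by omega
      simp only [htn]
    · rw [if_neg hcase]
      have hb0 : (0 : Int) ≤ R + (k : Int) - (m : Int) := by omega
      have hb1 : R + (k : Int) - (m : Int) < ((nbr.map (fun i : Nat => (i : Int))).length : Int) := by
        rw [List.length_map, ← hmdef]; omega
      rw [PySem.List.pyGetD_eq_getElem (nbr.map (fun i : Nat => (i : Int))) 0 hb0 hb1, List.getElem_map]
      by_cases hkm : k < m
      · rw [List.getElem_append_left (by rw [hXlen]; omega)]
        rw [List.getElem_map]
        rw [List.getElem_append_right (by rw [List.length_drop]; omega)]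
        rw [List.getElem_take]
        have htn : (R + (k : Int) - (m : Int)).toNat = k - (List.drop r nbr).length := by
          simp only [List.length_drop]; omega
        simp only [htn]
      · rw [List.getElem_append_right (by rw [hXlen]; omega)]
        have h0 : k - ((nbr.drop r ++ nbr.take r).map (fun i : Nat => PySem.List.pyGetD p (i : Int) 0)).length = 0 := by
          rw [hXlen]; omega
        simp only [h0, List.getElem_cons_zero]
        rw [List.getD_eq_getElem nbr 0 (by omega)]
        have htn : (R + (k : Int) - (m : Int)).toNat = r := by omega
        simp only [htn]

-- A's trailing pool pass adds nothing when the neighbour pass already visited every non-current value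
theorem dfold_phase3_noop (c : Int) (p X R1 : List Int)
    (hcov : ∀ v ∈ p, v = c ∨ v ∈ X) :
    List.foldl (fun acc v => if v ≠ c ∧ v ∉ acc then acc ++ [v] else acc)
      (List.foldl (fun acc v => if v ≠ c ∧ v ∉ acc then acc ++ [v] else acc) R1 X) p
    = List.foldl (fun acc v => if v ≠ c ∧ v ∉ acc then acc ++ [v] else acc) R1 X := by
  refine dfold_noop c p _ ?_
  intro v hv
  rcases hcov v hv with h | h
  · exact Or.inl h
  · by_cases hvc : v = c
    · exact Or.inl hvc
    · exact Or.inr (dfold_mem c X R1 v h hvc)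

-- ===== VERDICT (by name: the statement is the Claim_ definition above) =====
theorem guided_value_choice_py_spec : Claim_equal_guided_value_choice_py := by
  intro c al pref off bl _
  unfold Spec_guided_value_choice_py
  by_cases hA : al = []
  · simp [guided_value_choice_py, guided_value_choice_py_alt, hA]
  · simp only [guided_value_choice_py, guided_value_choice_py_alt, if_neg hA]
    have hpne : (if List.filter (fun v => !PySem.Set.contains (PySem.Set.ofList (bl.getD [])) v) al = []
        then al else List.filter (fun v => !PySem.Set.contains (PySem.Set.ofList (bl.getD [])) v) al) ≠ [] := by
      split
      · exact hA
      · assumption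
    generalize hgen : (if List.filter (fun v => !PySem.Set.contains (PySem.Set.ofList (bl.getD [])) v) al = []
        then al else List.filter (fun v => !PySem.Set.contains (PySem.Set.ofList (bl.getD [])) v) al) = p at hpne ⊢
    clear hgen hA
    obtain ⟨h1eq, h1inv⟩ := pairfold1 c p pref [] PySem.Set.empty
      (by intro v; simp [PySem.Set.contains, PySem.Set.empty])
    by_cases hc : c ∈ p
    · obtain ⟨ciN, hci⟩ := Option.isSome_iff_exists.mp ((PySem.List.index?_isSome_iff p c).mpr hc)
      obtain ⟨hciLt, hgetci, -⟩ := PySem.List.getElem_of_index?_eq_some hci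
      rw [if_pos hc, if_pos hc, if_pos hc]
      simp only [hci, Option.getD_some]
      rw [nbr_sorted ciN p.length hciLt]
      by_cases hn1 : p.length = 1
      · -- pool of length 1: p = [c]; the neighbour pass and the trailing pass both add nothing
        obtain ⟨a, rfl⟩ := List.length_eq_one_iff.mp hn1
        have hac : a = c := (by simpa using hc : c = a).symm
        subst hac
        have hci0 : ciN = 0 := by
          rw [PySem.List.index?_cons_self] at hci
          exact (Option.some_inj.mp hci).symm
        subst hci0
        have hnl : nbrList 0 ([a] : List Int).length = [] := rfl
        rw [hnl, if_pos rfl]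
        simp only [List.foldl_nil]
        rw [h1eq]
        have hmap : (PySem.List.pyRange 0 (([a] : List Int).length : Int) 1).map
            (fun step => neighbor_value_py a [a] (off + step)) = [a] := by
          have h1l : ((([a] : List Int).length : Nat) : Int) = 1 := by simp
          rw [h1l, show PySem.List.pyRange 0 1 1 = [0] from rfl]
          simp [neighbor_value_py, PySem.List.pyGetD_zero_cons]
        rw [hmap]
        rw [dfold_noop a [a] _ (by intro v hv; exact Or.inl (by simpa using hv))]
        rw [dfold_noop a [a] _ (by intro v hv; exact Or.inl (by simpa using hv))]
      · -- pool of length ≥ 2: B's sort-and-rotate equals A's repeated neighbour scan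
        have hn2 : 2 ≤ p.length := by
          have h0 : p.length ≠ 0 := fun h => hpne (List.length_eq_zero_iff.mp h)
          omega
        have hmne : nbrList ciN p.length ≠ [] := by
          intro h
          have hlen := congrArg List.length h
          rw [nbr_length ciN p.length hciLt] at hlen
          simp at hlen
          omega
        rw [if_neg hmne]
        rw [L_eq c off p ciN hpne hc hn1 hci]
        set nbr := nbrList ciN p.length with hnbr
        set r := (PySem.Int.mod off (nbr.length : Int)).toNat with hrdef
        have hml : nbr.length = p.length - 1 := nbr_length ciN p.length hciLt
        have hrm : r < nbr.length := by
          have hpos : (0 : Int) < (nbr.length : Int) := by omega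
          have h1 := Int.emod_nonneg off (by omega : (nbr.length : Int) ≠ 0)
          have h2 := Int.emod_lt_of_pos off hpos
          rw [hrdef, PySem.Int.mod_eq_emod_of_pos hpos]
          omega
        have hsub : ∀ x : Nat, x ∈ nbr → x ∈ nbr.drop r ++ nbr.take r := by
          intro x hx
          rw [← List.take_append_drop r nbr] at hx
          rcases List.mem_append.mp hx with h | h
          · exact List.mem_append.mpr (Or.inr h)
          · exact List.mem_append.mpr (Or.inl h)
        have hxmem : PySem.List.pyGetD p ((nbr.getD r 0 : Nat) : Int) 0
            ∈ (nbr.drop r ++ nbr.take r).map (fun i : Nat => PySem.List.pyGetD p (i : Int) 0) := by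
          refine List.mem_map.mpr ⟨nbr.getD r 0, ?_, rfl⟩
          rw [List.getD_eq_getElem nbr 0 hrm]
          exact hsub _ (List.getElem_mem hrm)
        rw [dfold_concat c _ _ hxmem]
        have hBfold : ∀ (l : List Nat) (st0 : List Int × PySem.Set Int),
            List.foldl (fun (st : List Int × PySem.Set Int) (i : Nat) =>
              if PySem.List.pyGetD p (i : Int) 0 ≠ c ∧ PySem.Set.contains st.2 (PySem.List.pyGetD p (i : Int) 0) = false
              then (st.1 ++ [PySem.List.pyGetD p (i : Int) 0], PySem.Set.add st.2 (PySem.List.pyGetD p (i : Int) 0)) else st)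
              st0 l
            = List.foldl (fun (st : List Int × PySem.Set Int) v =>
              if v ≠ c ∧ PySem.Set.contains st.2 v = false then (st.1 ++ [v], PySem.Set.add st.2 v) else st)
              st0 (l.map (fun i : Nat => PySem.List.pyGetD p (i : Int) 0)) := by
          intro l
          induction l with
          | nil => intro st0; rfl
          | cons x xs ih =>
            intro st0
            simp only [List.foldl_cons, List.map_cons]
            exact ih _
        rw [hBfold _ _]
        obtain ⟨h2eq, h2inv⟩ := pairfold2 c
          ((nbr.drop r ++ nbr.take r).map (fun i : Nat => PySem.List.pyGetD p (i : Int) 0)) _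
          (fun v => (h1inv v).trans (Eq.to_iff (congrArg (fun L => v ∈ L) h1eq.symm)))
        rw [h2eq, h1eq]
        have hcov : ∀ v ∈ p, v = c ∨ v ∈ (nbr.drop r ++ nbr.take r).map (fun i : Nat => PySem.List.pyGetD p (i : Int) 0) := by
          intro v hv
          by_cases hvc : v = c
          · exact Or.inl hvc
          · right
            obtain ⟨j, hjlt, hjv⟩ := List.getElem_of_mem hv
            have hjne : j ≠ ciN := by
              intro e
              subst e
              rw [hgetci] at hjv
              exact hvc hjv.symm
            have hjnbr : j ∈ nbr := by rw [hnbr]; exact (nbr_mem ciN p.length hciLt j).mpr ⟨hjlt, hjne⟩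
            have hjrot : j ∈ nbr.drop r ++ nbr.take r := hsub _ hjnbr
            refine List.mem_map.mpr ⟨j, hjrot, ?_⟩
            rw [PySem.List.pyGetD_eq_getElem p 0 (by omega) (by exact_mod_cast hjlt)]
            simpa using hjv
        rw [dfold_phase3_noop c p
          ((nbr.drop r ++ nbr.take r).map (fun i : Nat => PySem.List.pyGetD p (i : Int) 0))
          (List.foldl (fun acc v => if v ∈ p ∧ v ≠ c ∧ v ∉ acc then acc ++ [v] else acc) [] pref) hcov]
    · rw [if_neg hc, if_neg hc, if_neg hc]
      rw [pairfold3 p _ (fun v => (h1inv v).trans (Eq.to_iff (congrArg (fun L => v ∈ L) h1eq.symm))), h1eq]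
      rw [PySem.List.foldl_congr_mem p
        (fun acc v => if v ∉ acc then acc ++ [v] else acc)
        (fun acc v => if v ≠ c ∧ v ∉ acc then acc ++ [v] else acc)
        (List.foldl (fun acc v => if v ∈ p ∧ v ≠ c ∧ v ∉ acc then acc ++ [v] else acc) [] pref)
        (by intro acc x hx; have hxc : x ≠ c := fun e => hc (e ▸ hx); simp [hxc])]
      obtain ⟨v0, t0, hp0⟩ := List.exists_cons_of_ne_nil hpne
      have hv0 : v0 ∈ p := by rw [hp0]; exact List.mem_cons_self
      have hv0c : v0 ≠ c := fun e => hc (e ▸ hv0)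
      have hEne : List.foldl (fun acc v => if v ≠ c ∧ v ∉ acc then acc ++ [v] else acc)
          (List.foldl (fun acc v => if v ∈ p ∧ v ≠ c ∧ v ∉ acc then acc ++ [v] else acc) [] pref) p ≠ [] :=
        List.ne_nil_of_mem (dfold_mem c p _ v0 hv0 hv0c)
      rw [if_neg hEne, if_neg hEne]
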